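-- pv_equiv track=rewrite | github.com/JoshBonura/ai-agent-playground | aimodel/file_read/rag/retrieve.py | _trim_to_budget
-- ===== SOURCE A (Python) =====
-- from typing import List, Optional, Tuple, Dict, Any
--
-- def _trim_to_budget(lines: List[str], total_budget: int) -> str:
--     out = []
--     used = 0
--     for i, ln in enumerate(lines):
--         need = len(ln) + (1 if i > 0 else 0)
--         if used + need > total_budget:
--             break
--         if i > 0:
--             pass
--         out.append(ln)
--         used += need
--     return "\n".join(out)
-- ===== SOURCE B (Python) =====
-- from typing import List, Optional, Tuple, Dict, Any
--
-- def _trim_to_budget(lines: List[str], total_budget: int) -> str: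
--     # Pass 1: table of cumulative character costs (newline counted before every line but the first).
--     sums = []
--     t = 0
--     for i, ln in enumerate(lines):
--         t += len(ln) + (1 if i > 0 else 0)
--         sums.append(t)
--     # Pass 2: k = number of leading prefix sums within budget.
--     k = 0
--     for s in sums:
--         if s > total_budget:
--             break
--         k += 1
--     return "\n".join(lines[:k])
-- ===== Notes on version B (the rewrite author's own statement) =====
-- stated objective: alternative
-- what changed: Replaces the single accumulate-and-break loop that builds the output list with a two-pass scheme: build a cumulative-cost table, find the cutoff k as the count of prefix sums within budget, and return the join of lines[:k].
import Mathlib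
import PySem

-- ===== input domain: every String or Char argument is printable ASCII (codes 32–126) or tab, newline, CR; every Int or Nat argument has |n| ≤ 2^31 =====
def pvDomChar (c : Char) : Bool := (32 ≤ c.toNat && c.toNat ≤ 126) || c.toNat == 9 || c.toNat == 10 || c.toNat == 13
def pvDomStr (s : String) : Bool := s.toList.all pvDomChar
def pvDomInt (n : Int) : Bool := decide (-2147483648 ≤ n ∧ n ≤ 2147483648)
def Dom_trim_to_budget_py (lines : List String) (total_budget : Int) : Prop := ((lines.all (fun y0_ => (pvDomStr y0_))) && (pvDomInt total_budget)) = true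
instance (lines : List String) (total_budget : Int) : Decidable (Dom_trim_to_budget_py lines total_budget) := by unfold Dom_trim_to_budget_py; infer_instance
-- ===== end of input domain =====

-- B builds a cumulative-cost table and joins the prefix lines[:k]; A appends lines in one
-- accumulate-and-break loop.  Proved equal on the whole domain.
-- ===== PORT A =====
def trimLoopA (lines : List String) (total_budget : Int) (i : Nat) (used : Int)
    (out : List String) : List String :=
  match lines with
  | [] => out
  | ln :: rest =>
    let need : Int := PySem.Str.len ln + (if i > 0 then 1 else 0)
    if used + need > total_budget then out
    else trimLoopA rest total_budget (i + 1) (used + need) (out ++ [ln])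

def trim_to_budget_py (lines : List String) (total_budget : Int) : String :=
  PySem.Str.join "\n" (trimLoopA lines total_budget 0 0 [])

-- ===== PORT B =====
-- pass 1: cumulative-cost table (the python loop appends; built here by the same recursion)
def sumsB (lines : List String) (i : Nat) (t : Int) : List Int :=
  match lines with
  | [] => []
  | ln :: rest =>
    let t' := t + PySem.Str.len ln + (if i > 0 then 1 else 0)
    t' :: sumsB rest (i + 1) t'

-- pass 2: k = leading prefix sums within budget (loop with break)
def cutK (sums : List Int) (total_budget : Int) : Nat :=
  match sums with
  | [] => 0
  | s :: rest => if s > total_budget then 0 else cutK rest total_budget + 1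

def trim_to_budget_py_alt (lines : List String) (total_budget : Int) : String :=
  PySem.Str.join "\n" (lines.take (cutK (sumsB lines 0 0) total_budget))

-- ===== PRECONDITION & SPEC =====
def Spec_trim_to_budget_py (lines : List String) (total_budget : Int) (out : String) : Prop := out = trim_to_budget_py_alt lines total_budget
instance (lines : List String) (total_budget : Int) (out : String) : Decidable (Spec_trim_to_budget_py lines total_budget out) := by unfold Spec_trim_to_budget_py; infer_instance

-- ===== CLAIM (what is proved, stated in full; the proofs are below) =====
def Claim_equal_trim_to_budget_py : Prop := ∀ (lines : List String) (total_budget : Int), Dom_trim_to_budget_py lines total_budget → Spec_trim_to_budget_py lines total_budget (trim_to_budget_py lines total_budget)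

-- ===== LEMMAS AND PROOFS =====
-- the loop of A, from any positive index, is the prefix cut by B's table
theorem trimLoopA_eq_take (total_budget : Int) (lines : List String) :
    ∀ (i : Nat) (used : Int) (out : List String), 0 < i →
    trimLoopA lines total_budget i used out
      = out ++ lines.take (cutK (sumsB lines i used) total_budget) := by
  induction lines with
  | nil => intro i used out _; simp [trimLoopA, sumsB, cutK]
  | cons ln rest ih =>
    intro i used out hi
    simp only [trimLoopA, sumsB, cutK, PySem.Str.len_eq, if_pos hi, add_assoc]
    split_ifs with h1 h2 <;> try omega
    · simp
    · rw [ih (i+1) _ _ (Nat.succ_pos i)]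
      simp [List.take_succ_cons, List.append_assoc]

-- ===== VERDICT (by name: the statement is the Claim_ definition above) =====
theorem trim_to_budget_py_spec : Claim_equal_trim_to_budget_py := by
  intro lines total_budget _
  unfold Spec_trim_to_budget_py trim_to_budget_py trim_to_budget_py_alt
  cases lines with
  | nil => rfl
  | cons ln rest =>
    simp only [trimLoopA, sumsB, cutK, PySem.Str.len_eq, add_assoc]
    split_ifs with h1 h2 <;> try omega
    · simp
    · rw [trimLoopA_eq_take total_budget rest (0+1) _ ([] ++ [ln]) (by omega)]
      simp [List.take_succ_cons, List.append_assoc]
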